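-- pv_equiv track=rewrite | github.com/Aharper9917/AdvPy-aharper | kattis/GlitchBot/bot.py | checkPosEquality
-- ===== SOURCE A (Python) =====
-- def changeDir(currDir, turn):
--     directions = ['north', 'east', 'south', 'west']
--     turns = {
--         'right':  1,
--         'left' : -1
--     }
--     dirs = {
--         'north': 0,
--         'east' : 1,
--         'south': 2,
--         'west' : 3
--     }
--
--     currDir = dirs[currDir]
--     turn = turns[turn]
--
--     if(currDir + turn == 4):
--         d = directions[0]
--     else:
--         d = directions[currDir + turn]
--
--     return d
--
-- def move(pos, dir):
--     directions = ['north', 'east', 'south', 'west']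
--     dirs = {
--         'north': [ 0, 1],
--         'east' : [ 1, 0],
--         'south': [ 0,-1],
--         'west' : [-1, 0]
--     }
--     pos = [x + y for x, y in zip(pos, dirs[dir])]
--     return pos
--
-- def run(instructions):
--     pos = [0, 0]
--     direction = 'north'
--
--     for instruction in instructions:
--         if(instruction == 'right' or instruction == 'left'):
--             direction = changeDir(direction, instruction)
--         elif(instruction == 'forward'):
--             pos = move(pos, direction)
--
--     return pos
--
-- def checkPosEquality(coords, instructions):
--     steps = ['forward', 'left', 'right']
--
--     for i in range(len(instructions)):
--         x = instructions[i]
--         for step in steps: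
--             instructions[i] = step
--             if (run(instructions) == coords):
--                 return (str(i+1) + " " + str(step))
--             else:
--                 continue
--         instructions[i] = x
-- ===== SOURCE B (Python) =====
-- # O(n) re-implementation: precompute north-frame suffix displacements once, then
-- # evaluate each candidate edit in O(1) with a running prefix state.
-- # Note: A mutates `instructions` in place (leaves the successful edit applied);
-- # B does not mutate -- equivalence here is about the return value only.
-- def checkPosEquality(coords, instructions):
--     n = len(instructions)
--     # suf[j] = displacement of running instructions[j:] starting at dir 'north',
--     # expressed in the north frame.
--     suf = [(0, 0)] * (n + 1)
--     for j in range(n - 1, -1, -1):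
--         sx, sy = suf[j + 1]
--         ins = instructions[j]
--         if ins == 'forward':
--             suf[j] = (sx, sy + 1)
--         elif ins == 'right':
--             suf[j] = (sy, -sx)   # rotate frame right
--         elif ins == 'left':
--             suf[j] = (-sy, sx)   # rotate frame left
--         else:
--             suf[j] = (sx, sy)
--
--     def rot(v, d):
--         # rotate a north-frame vector into the frame of direction index d
--         x, y = v
--         for _ in range(d):
--             x, y = y, -x
--         return (x, y)
--
--     dirvec = [(0, 1), (1, 0), (0, -1), (-1, 0)]  # north, east, south, west
--     px, py, d = 0, 0, 0
--     for i in range(n):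
--         s = suf[i + 1]
--         dvx, dvy = dirvec[d]
--         # candidate 'forward': direction stays d
--         fx, fy = rot(s, d)
--         if [px + dvx + fx, py + dvy + fy] == coords:
--             return str(i + 1) + " " + "forward"
--         # candidate 'left': direction becomes (d+3)%4
--         lx, ly = rot(s, (d + 3) % 4)
--         if [px + lx, py + ly] == coords:
--             return str(i + 1) + " " + "left"
--         # candidate 'right': direction becomes (d+1)%4
--         rx, ry = rot(s, (d + 1) % 4)
--         if [px + rx, py + ry] == coords:
--             return str(i + 1) + " " + "right"
--         # advance prefix state with the actual instruction
--         ins = instructions[i]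
--         if ins == 'forward':
--             px, py = px + dvx, py + dvy
--         elif ins == 'right':
--             d = (d + 1) % 4
--         elif ins == 'left':
--             d = (d + 3) % 4
--     return None
-- ===== Notes on version B (the rewrite author's own statement) =====
-- stated objective: faster
-- what changed: Instead of rerunning the whole simulation for every candidate edit (3n full runs), B precomputes north-frame suffix displacement vectors once and walks a prefix state, evaluating each candidate edit in O(1) by rotating the suffix vector into the candidate's outgoing direction.
import Mathlib
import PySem

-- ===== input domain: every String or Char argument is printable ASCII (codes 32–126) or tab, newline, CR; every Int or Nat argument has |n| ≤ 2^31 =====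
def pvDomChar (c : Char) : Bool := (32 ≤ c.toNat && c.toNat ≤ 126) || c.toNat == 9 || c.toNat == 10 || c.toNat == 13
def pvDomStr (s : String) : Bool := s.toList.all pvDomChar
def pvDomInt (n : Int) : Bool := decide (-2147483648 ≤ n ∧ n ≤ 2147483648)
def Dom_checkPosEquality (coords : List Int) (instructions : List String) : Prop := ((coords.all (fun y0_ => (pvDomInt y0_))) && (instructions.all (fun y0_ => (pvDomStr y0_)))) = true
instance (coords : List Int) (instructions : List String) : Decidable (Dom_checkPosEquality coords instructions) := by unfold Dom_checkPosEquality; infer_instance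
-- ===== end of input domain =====

-- B replaces A's 3n full re-simulations with one suffix-vector precomputation and a running
-- prefix state (O(n) instead of O(n^2)). A mutates `instructions` in place (the successful
-- edit stays applied); B does not — the equivalence proved here is about the return value only.

-- ===== PORT A =====
def changeDirA (currDir turn : String) : String :=
  let directions : List String := ["north", "east", "south", "west"]
  let turns : PySem.Dict String Int := PySem.Dict.ofList [("right", 1), ("left", -1)]
  let dirs : PySem.Dict String Int := PySem.Dict.ofList [("north", 0), ("east", 1), ("south", 2), ("west", 3)]
  -- dict lookups dirs[currDir] / turns[turn]: every call site passes a key present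
  -- in the dict, so the .getD default is never used
  let cd := (dirs.get? currDir).getD 0
  let t := (turns.get? turn).getD 0
  if cd + t == 4 then (PySem.List.pyGet? directions 0).getD ""
  else (PySem.List.pyGet? directions (cd + t)).getD ""   -- index may be -1 (Python wraps)

def moveA (pos : List Int) (dir : String) : List Int :=
  let dirs : PySem.Dict String (List Int) :=
    PySem.Dict.ofList [("north", [0, 1]), ("east", [1, 0]), ("south", [0, -1]), ("west", [-1, 0])]
  List.zipWith (fun x y => x + y) pos ((dirs.get? dir).getD [])

def stepA (st : List Int × String) (instruction : String) : List Int × String :=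
  if instruction == "right" || instruction == "left" then (st.1, changeDirA st.2 instruction)
  else if instruction == "forward" then (moveA st.1 st.2, st.2)
  else st

def runA (instructions : List String) : List Int :=
  (instructions.foldl stepA ([0, 0], "north")).1

-- the 'for i in range(len(instructions))' loop, fuel = number of remaining indices
def cpeGoA (coords : List Int) (instr : List String) (i : Nat) : Nat → Option String
  | 0 => none
  | k + 1 =>
    let x := instr.getD i ""                       -- x = instructions[i]
    let l1 := instr.set i "forward"
    if runA l1 = coords then some (PySem.Int.toStr ((i : Int) + 1) ++ " " ++ "forward")
    else
      let l2 := l1.set i "left"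
      if runA l2 = coords then some (PySem.Int.toStr ((i : Int) + 1) ++ " " ++ "left")
      else
        let l3 := l2.set i "right"
        if runA l3 = coords then some (PySem.Int.toStr ((i : Int) + 1) ++ " " ++ "right")
        else cpeGoA coords (l3.set i x) (i + 1) k  -- instructions[i] = x, next i

def checkPosEquality (coords : List Int) (instructions : List String) : Option String :=
  cpeGoA coords instructions 0 instructions.length

-- ===== PORT B =====
-- rotate a north-frame vector into the frame of direction index d (d right turns)
def rotB (v : Int × Int) : Nat → Int × Int
  | 0 => v
  | d + 1 => (let w := rotB v d; (w.2, -w.1))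

-- suf[j] = displacement of running instructions[j:] starting north, in the north frame;
-- built back to front, list of length n+1
def sufListB (instr : List String) : List (Int × Int) :=
  instr.foldr
    (fun ins acc =>
      let s := acc.headD (0, 0)
      (if ins == "forward" then (s.1, s.2 + 1)
       else if ins == "right" then (s.2, -s.1)
       else if ins == "left" then (-s.2, s.1)
       else s) :: acc)
    [(0, 0)]

def dirvecB : List (Int × Int) := [(0, 1), (1, 0), (0, -1), (-1, 0)]

-- forward walk: i = index, (px,py,d) = state after instructions[:i], sufs = suf[i+1:]
def cpeGoB (coords : List Int) : Nat → Int → Int → Nat → List String → List (Int × Int) → Option String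
  | _, _, _, _, [], _ => none
  | i, px, py, d, ins :: rest, sufs =>
    let s := sufs.headD (0, 0)
    let dv := dirvecB.getD d (0, 0)
    let f := rotB s d
    if [px + dv.1 + f.1, py + dv.2 + f.2] = coords then
      some (PySem.Int.toStr ((i : Int) + 1) ++ " " ++ "forward")
    else
      let l := rotB s ((d + 3) % 4)
      if [px + l.1, py + l.2] = coords then
        some (PySem.Int.toStr ((i : Int) + 1) ++ " " ++ "left")
      else
        let r := rotB s ((d + 1) % 4)
        if [px + r.1, py + r.2] = coords then
          some (PySem.Int.toStr ((i : Int) + 1) ++ " " ++ "right")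
        else if ins == "forward" then
          cpeGoB coords (i + 1) (px + dv.1) (py + dv.2) d rest sufs.tail
        else if ins == "right" then
          cpeGoB coords (i + 1) px py ((d + 1) % 4) rest sufs.tail
        else if ins == "left" then
          cpeGoB coords (i + 1) px py ((d + 3) % 4) rest sufs.tail
        else
          cpeGoB coords (i + 1) px py d rest sufs.tail

def checkPosEquality_alt (coords : List Int) (instructions : List String) : Option String :=
  cpeGoB coords 0 0 0 0 instructions (sufListB instructions).tail

-- ===== PRECONDITION & SPEC =====
def Spec_checkPosEquality (coords : List Int) (instructions : List String) (out : Option String) : Prop := out = checkPosEquality_alt coords instructions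
instance (coords : List Int) (instructions : List String) (out : Option String) : Decidable (Spec_checkPosEquality coords instructions out) := by unfold Spec_checkPosEquality; infer_instance

-- ===== CLAIM (what is proved, stated in full; the proofs are below) =====
def Claim_equal_checkPosEquality : Prop := ∀ (coords : List Int) (instructions : List String), Dom_checkPosEquality coords instructions → Spec_checkPosEquality coords instructions (checkPosEquality coords instructions)

-- ===== LEMMAS AND PROOFS =====

-- semantic model of a run: north-frame displacement and net turn count
def sufVec : List String → Int × Int
  | [] => (0, 0)
  | ins :: rest =>
    let s := sufVec rest
    if ins == "forward" then (s.1, s.2 + 1)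
    else if ins == "right" then (s.2, -s.1)
    else if ins == "left" then (-s.2, s.1)
    else s

def turnC : List String → Nat
  | [] => 0
  | ins :: rest =>
    ((if ins == "right" then 1 else if ins == "left" then 3 else 0) + turnC rest) % 4

def dirStr : Nat → String
  | 0 => "north" | 1 => "east" | 2 => "south" | _ => "west"

theorem sufListB_headD (l : List String) : (sufListB l).headD (0, 0) = sufVec l := by
  induction l with
  | nil => rfl
  | cons ins rest ih => simp [sufListB, List.foldr, sufVec] at ih ⊢; rw [← ih]

theorem sufListB_cons (ins : String) (rest : List String) :
    sufListB (ins :: rest) = (sufVec (ins :: rest)) :: sufListB rest := by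
  simp [sufListB, List.foldr, sufVec, ← sufListB_headD rest]

theorem rotB_zero (d : Nat) : rotB (0, 0) d = (0, 0) := by
  induction d with
  | zero => rfl
  | succ d ih => simp [rotB, ih]

theorem set_append_len {α : Type} (pre : List α) (a b : α) (r : List α) :
    (pre ++ a :: r).set pre.length b = pre ++ b :: r := by
  induction pre with
  | nil => rfl
  | cons x xs ih => simp [ih]

theorem getD_append_len {α : Type} [Inhabited α] (pre : List α) (a : α) (r : List α) (dflt : α) :
    (pre ++ a :: r).getD pre.length dflt = a := by
  induction pre with
  | nil => rfl
  | cons x xs ih => simpa [List.getD] using ih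

theorem lookNorth : (((PySem.Dict.ofList [("north", [0, 1]), ("east", [1, 0]), ("south", [0, -1]), ("west", [-1, 0])]).get? "north").getD ([] : List Int)) = [0, 1] := by decide
theorem lookEast : (((PySem.Dict.ofList [("north", [0, 1]), ("east", [1, 0]), ("south", [0, -1]), ("west", [-1, 0])]).get? "east").getD ([] : List Int)) = [1, 0] := by decide
theorem lookSouth : (((PySem.Dict.ofList [("north", [0, 1]), ("east", [1, 0]), ("south", [0, -1]), ("west", [-1, 0])]).get? "south").getD ([] : List Int)) = [0, -1] := by decide
theorem lookWest : (((PySem.Dict.ofList [("north", [0, 1]), ("east", [1, 0]), ("south", [0, -1]), ("west", [-1, 0])]).get? "west").getD ([] : List Int)) = [-1, 0] := by decide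

theorem stepA_forward (px py : Int) (d : Nat) (hd : d < 4) :
    stepA ([px, py], dirStr d) "forward" =
      ([px + (dirvecB.getD d (0, 0)).1, py + (dirvecB.getD d (0, 0)).2], dirStr d) := by
  interval_cases d <;> simp [stepA, moveA, dirStr, dirvecB, lookNorth, lookEast, lookSouth, lookWest]

theorem stepA_right (px py : Int) (d : Nat) (hd : d < 4) :
    stepA ([px, py], dirStr d) "right" = ([px, py], dirStr ((d + 1) % 4)) := by
  interval_cases d <;> rfl

theorem stepA_left (px py : Int) (d : Nat) (hd : d < 4) :
    stepA ([px, py], dirStr d) "left" = ([px, py], dirStr ((d + 3) % 4)) := by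
  interval_cases d <;> rfl

theorem stepA_other (st : List Int × String) (ins : String)
    (h1 : ins ≠ "forward") (h2 : ins ≠ "right") (h3 : ins ≠ "left") :
    stepA st ins = st := by
  simp [stepA, h1, h2, h3]

theorem foldl_stepA_char (l : List String) : ∀ (px py : Int) (d : Nat), d < 4 →
    l.foldl stepA ([px, py], dirStr d) =
      ([px + (rotB (sufVec l) d).1, py + (rotB (sufVec l) d).2], dirStr ((d + turnC l) % 4)) := by
  induction l with
  | nil =>
    intro px py d hd
    simp [sufVec, turnC, rotB_zero, Nat.mod_eq_of_lt hd]
  | cons ins rest ih =>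
    intro px py d hd
    rw [List.foldl_cons]
    by_cases hf : ins = "forward"
    · subst hf
      rw [stepA_forward px py d hd, ih _ _ d hd]
      simp only [Prod.mk.injEq]
      refine ⟨?_, congrArg dirStr (by simp [turnC]; try omega)⟩
      interval_cases d <;> simp [sufVec, rotB, dirvecB] <;> try (ring_nf <;> try simp [add_comm, add_left_comm])
    · by_cases hr : ins = "right"
      · subst hr
        rw [stepA_right px py d hd, ih _ _ ((d + 1) % 4) (by omega)]
        simp only [Prod.mk.injEq]
        refine ⟨?_, congrArg dirStr (by simp [turnC]; try omega)⟩
        interval_cases d <;> simp [sufVec, rotB] <;> try (ring_nf <;> try simp [add_comm, add_left_comm])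
      · by_cases hl : ins = "left"
        · subst hl
          rw [stepA_left px py d hd, ih _ _ ((d + 3) % 4) (by omega)]
          simp only [Prod.mk.injEq]
          refine ⟨?_, congrArg dirStr (by simp [turnC]; try omega)⟩
          interval_cases d <;> simp [sufVec, rotB] <;> try (ring_nf <;> try simp [add_comm, add_left_comm])
        · rw [stepA_other _ _ hf hr hl, ih _ _ d hd]
          simp only [Prod.mk.injEq]
          refine ⟨?_, congrArg dirStr (by simp [turnC, hr, hl])⟩
          simp [sufVec, hf, hr, hl]

theorem runA_from (r : List String) (px py : Int) (d : Nat) (hd : d < 4) :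
    (r.foldl stepA ([px, py], dirStr d)).1 =
      [px + (rotB (sufVec r) d).1, py + (rotB (sufVec r) d).2] := by
  rw [foldl_stepA_char r px py d hd]

theorem go_eq (rest : List String) : ∀ (coords : List Int) (pre : List String) (px py : Int) (d : Nat),
    d < 4 →
    pre.foldl stepA ([0, 0], "north") = ([px, py], dirStr d) →
    cpeGoA coords (pre ++ rest) pre.length rest.length =
      cpeGoB coords pre.length px py d rest (sufListB rest).tail := by
  induction rest with
  | nil =>
    intro coords pre px py d hd H
    simp [cpeGoA, cpeGoB]
  | cons ins r ih =>
    intro coords pre px py d hd H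
    have hrun : ∀ b : String, runA (pre ++ b :: r) =
        (List.foldl stepA (stepA ([px, py], dirStr d) b) r).1 := by
      intro b
      simp [runA, List.foldl_append, H]
    have hrunF : runA (pre ++ "forward" :: r) =
        [px + (dirvecB.getD d (0, 0)).1 + (rotB (sufVec r) d).1,
         py + (dirvecB.getD d (0, 0)).2 + (rotB (sufVec r) d).2] := by
      rw [hrun, stepA_forward px py d hd, runA_from r _ _ d hd]
    have hrunL : runA (pre ++ "left" :: r) =
        [px + (rotB (sufVec r) ((d + 3) % 4)).1, py + (rotB (sufVec r) ((d + 3) % 4)).2] := by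
      rw [hrun, stepA_left px py d hd, runA_from r _ _ _ (by omega)]
    have hrunR : runA (pre ++ "right" :: r) =
        [px + (rotB (sufVec r) ((d + 1) % 4)).1, py + (rotB (sufVec r) ((d + 1) % 4)).2] := by
      rw [hrun, stepA_right px py d hd, runA_from r _ _ _ (by omega)]
    have htail : cpeGoA coords (pre ++ ins :: r) (pre.length + 1) r.length =
        (if ins == "forward" then
          cpeGoB coords (pre.length + 1) (px + (dirvecB.getD d (0, 0)).1)
            (py + (dirvecB.getD d (0, 0)).2) d r (sufListB r).tail
        else if ins == "right" then
          cpeGoB coords (pre.length + 1) px py ((d + 1) % 4) r (sufListB r).tail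
        else if ins == "left" then
          cpeGoB coords (pre.length + 1) px py ((d + 3) % 4) r (sufListB r).tail
        else cpeGoB coords (pre.length + 1) px py d r (sufListB r).tail) := by
      have hstep : pre ++ ins :: r = (pre ++ [ins]) ++ r := by simp
      have hlen2 : (pre ++ [ins]).length = pre.length + 1 := by simp
      have Hfold : (pre ++ [ins]).foldl stepA ([0, 0], "north") = stepA ([px, py], dirStr d) ins := by
        rw [List.foldl_append, H]; rfl
      rw [hstep, ← hlen2]
      by_cases hf : ins = "forward"
      · subst hf
        rw [ih coords _ _ _ d hd (by rw [Hfold, stepA_forward px py d hd])]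
        simp
      · by_cases hr : ins = "right"
        · subst hr
          rw [ih coords _ px py ((d + 1) % 4) (by omega) (by rw [Hfold, stepA_right px py d hd])]
          simp
        · by_cases hl : ins = "left"
          · subst hl
            rw [ih coords _ px py ((d + 3) % 4) (by omega) (by rw [Hfold, stepA_left px py d hd])]
            simp
          · rw [ih coords _ px py d hd (by rw [Hfold, stepA_other _ _ hf hr hl])]
            simp [hf, hr, hl]
    rw [List.length_cons]
    simp only [cpeGoA, cpeGoB, sufListB_cons, List.tail_cons, sufListB_headD,
      getD_append_len, set_append_len, hrunF, hrunL, hrunR, htail]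

-- ===== VERDICT (by name: the statement is the Claim_ definition above) =====
theorem checkPosEquality_spec : Claim_equal_checkPosEquality := by
  intro coords instructions _
  unfold Spec_checkPosEquality checkPosEquality checkPosEquality_alt
  have := go_eq instructions coords [] 0 0 0 (by omega) rfl
  simpa using this
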